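-- pv_equiv track=rewrite | github.com/ISAC-GROUP/UltraWrite | Process/SignalProcess.py | delete_peak
-- ===== SOURCE A (Python) =====
-- def delete_peak(signal):
--     size = len(signal)
--     peaks = []
--     index = 0
--     while index < size:
--         if signal[index] > 0:
--             # get the begin of peak
--             peak_value = signal[index]
--             begin = index
--             # get the end of peak
--             while True:
--                 index += 1
--                 if index == size or signal[index] == 0:
--                     break
--                 if signal[index] > peak_value:
--                     peak_value = signal[index]
--             if index == size:
--                 end = size - 1
--             else:
--                 end = index
--             peaks.append([begin, end, peak_value])
--         else:
--             index += 1
--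
--     peak_index = []
--
--     for peak in peaks:
--         begin = peak[0]
--         end = peak[1]
--         value = peak[2]
--
--         if value <= 3:
--             # signal[begin:end] = 0
--             continue
--
--         # if (peak[0] >= 50 and peak[0] <= 60) or (peak[1] >= 50 and peak[1] <= 60):
--         #     continue
--
--         while signal[begin] <= 1:
--             begin += 1
--
--         while signal[end] <= 1:
--             end -= 1
--
--         if value <= 11 and (end - begin) <= 5:
--             peak_index.append([peak[0],peak[1]])
--
--     return peak_index
-- ===== SOURCE B (Python) =====
-- def delete_peak(sig):
--     # table-driven: precompute suffix/prefix lookup tables, then classify each run in O(1)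
--     n = len(sig)
--     nz = [n] * (n + 1)          # nz[i]: first index >= i holding 0 (n if none)
--     for i in range(n - 1, -1, -1):
--         nz[i] = i if sig[i] == 0 else nz[i + 1]
--     fgt1 = [n] * (n + 1)        # fgt1[i]: first index >= i with value > 1 (n if none)
--     for i in range(n - 1, -1, -1):
--         fgt1[i] = i if sig[i] > 1 else fgt1[i + 1]
--     bmax = [0] * (n + 1)        # bmax[i]: max of the zero-delimited block from i (0 at a zero)
--     for i in range(n - 1, -1, -1):
--         v = sig[i]
--         bmax[i] = 0 if v == 0 else (v if v > bmax[i + 1] else bmax[i + 1])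
--     lgt1 = [-1] * (n + 1)       # lgt1[i]: last index < i with value > 1 (-1 if none)
--     for i in range(n):
--         lgt1[i + 1] = i if sig[i] > 1 else lgt1[i]
--     # run starts: the first positive element of each zero-delimited block
--     starts = []
--     lpos = lzero = -1
--     for i in range(n):
--         v = sig[i]
--         if v > 0 and lpos <= lzero:
--             starts.append(i)
--         if v > 0:
--             lpos = i
--         elif v == 0:
--             lzero = i
--     # pure table lookups per run: no rescanning of the sig
--     out = []
--     for b in starts:
--         value = bmax[b]
--         if 3 < value <= 11:
--             end = nz[b] if nz[b] < n else n - 1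
--             if lgt1[end + 1] - fgt1[b] <= 5:
--                 out.append([b, end])
--     return out
-- ===== Notes on version B (the rewrite author's own statement) =====
-- stated objective: alternative
-- what changed: B replaces A's index-mutating scan with nested while-loops (inline max tracking and per-peak trim loops) by a table-driven algorithm: it precomputes next-zero, block-max, first-index>1 and last-index>1 lookup tables in straight-line sweeps, collects run starts in one pass, and then decides each run by O(1) table lookups with no rescanning or trim loops.
import Mathlib
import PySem

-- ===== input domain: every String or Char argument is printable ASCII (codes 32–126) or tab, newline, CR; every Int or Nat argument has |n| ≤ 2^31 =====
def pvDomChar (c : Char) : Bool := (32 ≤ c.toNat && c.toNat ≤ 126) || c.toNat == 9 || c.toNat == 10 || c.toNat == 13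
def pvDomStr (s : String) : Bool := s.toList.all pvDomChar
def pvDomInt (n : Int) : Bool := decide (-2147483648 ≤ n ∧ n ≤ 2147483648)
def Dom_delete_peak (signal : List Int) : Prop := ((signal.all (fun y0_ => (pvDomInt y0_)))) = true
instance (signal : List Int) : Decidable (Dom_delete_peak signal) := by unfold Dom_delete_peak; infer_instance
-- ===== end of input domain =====

-- B replaces A's scan-with-inner-loops by a table-driven algorithm (precomputed lookup tables,
-- then O(1) classification per run); same asymptotic cost, no speed claim.

-- ===== PORT A =====
-- A's inner `while True` loop: advances index, tracks the running peak value; transliterated as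
-- structural recursion on a fuel bound (fuel = size suffices: index grows by 1 per step and the
-- loop stops at size); accesses signal[index] only after checking index < size, so List.getD is
-- exact here.
def apInner (signal : List Int) (size : Nat) : Nat → Nat → Int → Nat × Int
  | 0, idx, pv => (idx + 1, pv)
  | fuel + 1, idx, pv =>
      let idx' := idx + 1
      if size ≤ idx' then (idx', pv)
      else
        let v := signal.getD idx' 0
        if v = 0 then (idx', pv)
        else apInner signal size fuel idx' (if pv < v then v else pv)

-- A's outer `while index < size` loop accumulating the peaks list (fuel = size + 1 suffices:
-- index strictly increases each iteration).
def apOuter (signal : List Int) (size : Nat) : Nat → Nat → List (Int × Int × Int) → List (Int × Int × Int)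
  | 0, _, peaks => peaks
  | fuel + 1, idx, peaks =>
      if size ≤ idx then peaks
      else
        let v := signal.getD idx 0
        if 0 < v then
          let r := apInner signal size size idx v
          let e : Int := if r.1 = size then (size : Int) - 1 else (r.1 : Int)
          apOuter signal size fuel r.1 (peaks ++ [((idx : Int), e, r.2)])
        else apOuter signal size fuel (idx + 1) peaks

-- A's `while signal[begin] <= 1: begin += 1` loop; pyGet? is Python indexing (negative wrap);
-- fuel size+1 always suffices on the states A reaches (the loop stops at an element > 3).
def apTrimUp (signal : List Int) : Nat → Int → Int
  | 0, b => b
  | fuel + 1, b =>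
      if (PySem.List.pyGet? signal b).getD 2 ≤ 1 then apTrimUp signal fuel (b + 1) else b

-- A's `while signal[end] <= 1: end -= 1` loop.
def apTrimDown (signal : List Int) : Nat → Int → Int
  | 0, e => e
  | fuel + 1, e =>
      if (PySem.List.pyGet? signal e).getD 2 ≤ 1 then apTrimDown signal fuel (e - 1) else e

-- body of A's `for peak in peaks` filter loop
def apStep (signal : List Int) (acc : List (List Int)) (p : Int × Int × Int) : List (List Int) :=
  if p.2.2 ≤ 3 then acc
  else
    let b := apTrimUp signal (signal.length + 1) p.1
    let e := apTrimDown signal (signal.length + 1) p.2.1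
    if p.2.2 ≤ 11 ∧ e - b ≤ 5 then acc ++ [[p.1, p.2.1]] else acc

def delete_peak (signal : List Int) : List (List Int) :=
  (apOuter signal signal.length (signal.length + 1) 0 []).foldl (apStep signal) []

-- ===== PORT B =====
-- Source B's backward sweep `nz[i] = i if signal[i] == 0 else nz[i+1]`: the table is built from the
-- back, each entry reading the entry just written (the head of the already-built suffix table).
def bNz (n : Nat) : Nat → List Int → List Nat
  | _, [] => [n]
  | i, v :: rest =>
      let t := bNz n (i + 1) rest
      (if v = 0 then i else t.headD n) :: t

-- Source B's backward sweep `fgt1[i] = i if signal[i] > 1 else fgt1[i+1]`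
def bFgt1 (n : Nat) : Nat → List Int → List Nat
  | _, [] => [n]
  | i, v :: rest =>
      let t := bFgt1 n (i + 1) rest
      (if 1 < v then i else t.headD n) :: t

-- Source B's backward sweep `bmax[i] = 0 if v == 0 else (v if v > bmax[i+1] else bmax[i+1])`
def bBmax : List Int → List Int
  | [] => [0]
  | v :: rest =>
      let t := bBmax rest
      (if v = 0 then 0 else (if t.headD 0 < v then v else t.headD 0)) :: t

-- Source B's forward sweep `lgt1[i+1] = i if signal[i] > 1 else lgt1[i]` (entries for 1..n;
-- the carried `last` is the entry just written)
def bLgt1 : Nat → Int → List Int → List Int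
  | _, _, [] => []
  | i, last, v :: rest =>
      let cur := if 1 < v then (i : Int) else last
      cur :: bLgt1 (i + 1) cur rest

-- Source B's run-start pass: emit i when signal[i] > 0 and lpos <= lzero, then update lpos/lzero
def bStarts : Nat → Int → Int → List Int → List Nat
  | _, _, _, [] => []
  | i, lpos, lzero, v :: rest =>
      (if 0 < v ∧ lpos ≤ lzero then [i] else []) ++
        bStarts (i + 1) (if 0 < v then (i : Int) else lpos)
          (if 0 < v then lzero else if v = 0 then (i : Int) else lzero) rest

-- body of Source B's `for b in starts` loop: pure table lookups
def bStep (n : Nat) (nzT fgt1T : List Nat) (bmaxT lgt1T : List Int)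
    (acc : List (List Int)) (b : Nat) : List (List Int) :=
  let value := bmaxT.getD b 0
  if 3 < value ∧ value ≤ 11 then
    let e := if nzT.getD b n < n then nzT.getD b n else n - 1
    if lgt1T.getD (e + 1) (-1) - ((fgt1T.getD b n : Nat) : Int) ≤ 5 then
      acc ++ [[(b : Int), (e : Int)]]
    else acc
  else acc

def delete_peak_alt (signal : List Int) : List (List Int) :=
  let n := signal.length
  (bStarts 0 (-1) (-1) signal).foldl
    (bStep n (bNz n 0 signal) (bFgt1 n 0 signal) (bBmax signal)
      ((-1 : Int) :: bLgt1 0 (-1) signal)) []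

-- ===== PRECONDITION & SPEC =====
def Spec_delete_peak (signal : List Int) (out : List (List Int)) : Prop := out = delete_peak_alt signal
instance (signal : List Int) (out : List (List Int)) : Decidable (Spec_delete_peak signal out) := by unfold Spec_delete_peak; infer_instance

-- ===== CLAIM (what is proved, stated in full; the proofs are below) =====
def Claim_equal_delete_peak : Prop := ∀ (signal : List Int), Dom_delete_peak signal → Spec_delete_peak signal (delete_peak signal)

-- ===== LEMMAS AND PROOFS =====

-- first index ≥ i holding 0 (or the length); characterises where A's inner loop stops
def zEnd (signal : List Int) (i : Nat) : Nat :=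
  if h : signal.length ≤ i then signal.length
  else if signal.getD i 0 = 0 then i
  else zEnd signal (i + 1)
termination_by signal.length - i
decreasing_by omega

-- first index ≥ i with value > 1 (or the length); the meaning of Source B's fgt1 table
def fIdx (signal : List Int) (i : Nat) : Nat :=
  if h : signal.length ≤ i then signal.length
  else if 1 < signal.getD i 0 then i
  else fIdx signal (i + 1)
termination_by signal.length - i
decreasing_by omega

-- max of the zero-delimited block starting at i; the meaning of Source B's bmax table
def bm (signal : List Int) (i : Nat) : Int :=
  if h : signal.length ≤ i then 0
  else if signal.getD i 0 = 0 then 0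
  else (if bm signal (i + 1) < signal.getD i 0 then signal.getD i 0 else bm signal (i + 1))
termination_by signal.length - i
decreasing_by all_goals omega

-- last index < i with value > 1 (or -1); the meaning of Source B's lgt1 table
def lg (signal : List Int) : Nat → Int
  | 0 => -1
  | i + 1 => if 1 < signal.getD i 0 then (i : Int) else lg signal i

theorem zEnd_ge (signal : List Int) (i : Nat) (hi : i ≤ signal.length) : i ≤ zEnd signal i := by
  fun_induction zEnd <;> omega

theorem zEnd_le (signal : List Int) (i : Nat) : zEnd signal i ≤ signal.length := by
  fun_induction zEnd <;> omega

theorem zEnd_succ (signal : List Int) (i : Nat) (h : i < signal.length)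
    (hnz : signal.getD i 0 ≠ 0) : zEnd signal i = zEnd signal (i + 1) := by
  conv_lhs => rw [zEnd]
  rw [dif_neg (Nat.not_le.mpr h), if_neg hnz]

theorem apInner_fst_lt (signal : List Int) (size : Nat) : ∀ (fuel idx : Nat) (pv : Int),
    idx < (apInner signal size fuel idx pv).1 := by
  intro fuel
  induction fuel with
  | zero => intro idx pv; simp [apInner]
  | succ fuel ih =>
      intro idx pv
      simp only [apInner]
      split_ifs
      · simp
      · simp
      · exact Nat.lt_trans (Nat.lt_succ_self idx) (ih (idx + 1) _)
      · exact Nat.lt_trans (Nat.lt_succ_self idx) (ih (idx + 1) _)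

-- A's inner loop (with adequate fuel) = (zEnd, running max over the scanned indices)
theorem apInner_eq_aux (signal : List Int) (fuel : Nat) : ∀ (i : Nat) (pv : Int),
    i < signal.length → zEnd signal (i + 1) - (i + 1) ≤ fuel →
    apInner signal signal.length fuel i pv =
      (zEnd signal (i + 1),
       List.foldl (fun m j => if m < signal.getD j 0 then signal.getD j 0 else m) pv
         (List.range' (i + 1) (zEnd signal (i + 1) - (i + 1)))) := by
  induction fuel with
  | zero =>
      intro i pv h hf
      have h1 := zEnd_ge signal (i + 1) (by omega)
      have hz : zEnd signal (i + 1) = i + 1 := by omega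
      simp [apInner, hz]
  | succ fuel ih =>
      intro i pv h hf
      by_cases hle : signal.length ≤ i + 1
      · have hz : zEnd signal (i + 1) = signal.length := by rw [zEnd, dif_pos hle]
        have hEq : i + 1 = signal.length := by omega
        simp [apInner, hz, ← hEq]
      · by_cases hv : signal.getD (i + 1) 0 = 0
        · have hz : zEnd signal (i + 1) = i + 1 := by rw [zEnd, dif_neg hle, if_pos hv]
          have hv' : signal[i + 1]?.getD 0 = 0 := by
            rwa [List.getD_eq_getElem?_getD] at hv
          simp [apInner, hle, hv', hz]
        · have h1 : i + 1 < signal.length := Nat.lt_of_not_le hle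
          have hz : zEnd signal (i + 1) = zEnd signal (i + 2) := zEnd_succ signal (i + 1) h1 hv
          have hge : i + 2 ≤ zEnd signal (i + 2) := zEnd_ge signal (i + 2) (by omega)
          have hr : List.range' (i + 1) (zEnd signal (i + 2) - (i + 1)) =
              (i + 1) :: List.range' (i + 2) (zEnd signal (i + 2) - (i + 2)) := by
            have hc : zEnd signal (i + 2) - (i + 1) = (zEnd signal (i + 2) - (i + 2)) + 1 := by omega
            rw [hc, List.range'_succ]
          have hv' : ¬ signal[i + 1]?.getD 0 = 0 := by
            rwa [List.getD_eq_getElem?_getD] at hv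
          have hstep : apInner signal signal.length (fuel + 1) i pv =
              apInner signal signal.length fuel (i + 1)
                (if pv < signal.getD (i + 1) 0 then signal.getD (i + 1) 0 else pv) := by
            simp [apInner, hle, hv', List.getD_eq_getElem?_getD]
          have hf' : zEnd signal (i + 1 + 1) - (i + 1 + 1) ≤ fuel := by
            simp only [show i + 1 + 1 = i + 2 from rfl]
            omega
          rw [hstep, ih (i + 1) _ h1 hf']
          simp only [show i + 1 + 1 = i + 2 from rfl, hz, hr]
          simp only [List.foldl_cons]

theorem apInner_eq (signal : List Int) (i : Nat) (pv : Int) (h : i < signal.length) :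
    apInner signal signal.length signal.length i pv =
      (zEnd signal (i + 1),
       List.foldl (fun m j => if m < signal.getD j 0 then signal.getD j 0 else m) pv
         (List.range' (i + 1) (zEnd signal (i + 1) - (i + 1)))) :=
  apInner_eq_aux signal signal.length i pv h (by have := zEnd_le signal (i + 1); omega)

-- the runs A detects: (begin, stop index, peak value)
def runsA (signal : List Int) (i : Nat) : List (Nat × Nat × Int) :=
  if h : signal.length ≤ i then []
  else if 0 < signal.getD i 0 then
    (i, apInner signal signal.length signal.length i (signal.getD i 0)) ::
      runsA signal (apInner signal signal.length signal.length i (signal.getD i 0)).1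
  else runsA signal (i + 1)
termination_by signal.length - i
decreasing_by
  all_goals first
    | (have := apInner_fst_lt signal signal.length signal.length i (signal.getD i 0); omega)
    | omega

def mkPeak (size : Nat) (p : Nat × Nat × Int) : Int × Int × Int :=
  ((p.1 : Int), (if p.2.1 = size then (size : Int) - 1 else (p.2.1 : Int)), p.2.2)

theorem apOuter_eq (signal : List Int) : ∀ (fuel i : Nat) (peaks : List (Int × Int × Int)),
    signal.length - i < fuel →
    apOuter signal signal.length fuel i peaks =
      peaks ++ (runsA signal i).map (mkPeak signal.length) := by
  intro fuel
  induction fuel with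
  | zero => intro i peaks h; omega
  | succ fuel ih =>
      intro i peaks h
      by_cases hle : signal.length ≤ i
      · rw [runsA, dif_pos hle]
        simp [apOuter, hle]
      · by_cases hv : 0 < signal.getD i 0
        · have hlt := apInner_fst_lt signal signal.length signal.length i (signal.getD i 0)
          have hstep : apOuter signal signal.length (fuel + 1) i peaks =
              apOuter signal signal.length fuel
                (apInner signal signal.length signal.length i (signal.getD i 0)).1
                (peaks ++ [((i : Int),
                  (if (apInner signal signal.length signal.length i (signal.getD i 0)).1 = signal.length
                   then (signal.length : Int) - 1
                   else ((apInner signal signal.length signal.length i (signal.getD i 0)).1 : Int)),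
                  (apInner signal signal.length signal.length i (signal.getD i 0)).2)]) := by
            have hv' : 0 < signal[i]?.getD 0 := by
              rwa [List.getD_eq_getElem?_getD] at hv
            simp [apOuter, hle, hv', List.getD_eq_getElem?_getD]
          rw [hstep, ih _ _ (by omega)]
          conv_rhs => rw [runsA]
          rw [dif_neg hle, if_pos hv]
          show _ = peaks ++ List.map (mkPeak signal.length)
            ((i, apInner signal signal.length signal.length i (signal.getD i 0)) ::
              runsA signal (apInner signal signal.length signal.length i (signal.getD i 0)).1)
          simp [mkPeak, List.append_assoc]
        · have hstep : apOuter signal signal.length (fuel + 1) i peaks =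
              apOuter signal signal.length fuel (i + 1) peaks := by
            have hv' : ¬ 0 < signal[i]?.getD 0 := by
              rwa [List.getD_eq_getElem?_getD] at hv
            simp only [apOuter]
            rw [if_neg hle]
            simp only [List.getD_eq_getElem?_getD]
            rw [if_neg hv']
          rw [hstep, ih _ _ (by omega)]
          conv_rhs => rw [runsA]
          rw [dif_neg hle, if_neg hv]

-- getD of a mapped range'
theorem getD_map_range' {α : Type} (f : Nat → α) (i m k : Nat) (d : α) (h : k < m) :
    (((List.range' i m).map f).getD k d) = f (i + k) := by
  rw [List.getD_eq_getElem?_getD, List.getElem?_map, List.getElem?_range' ]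
  · simp
  · exact h

-- facts extracted from `signal.drop i = v :: rest`
theorem drop_cons_facts (signal : List Int) (i : Nat) (v : Int) (rest : List Int)
    (h : signal.drop i = v :: rest) :
    i < signal.length ∧ signal.getD i 0 = v ∧ signal.drop (i + 1) = rest := by
  have hlen : signal.length - i = rest.length + 1 := by
    have := congrArg List.length h
    simpa using this
  have hi : i < signal.length := by omega
  have hg : signal[i]? = some v := by
    have h0 : (signal.drop i)[0]? = some v := by rw [h]; rfl
    rwa [List.getElem?_drop, Nat.add_zero] at h0
  refine ⟨hi, ?_, ?_⟩
  · rw [List.getD_eq_getElem?_getD, hg]; rfl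
  · have : signal.drop (i + 1) = (signal.drop i).drop 1 := by
      rw [List.drop_drop, Nat.add_comm]
    rw [this, h]; rfl

-- table characterizations: each table is the corresponding reference function, tabulated
theorem bNz_eq (signal : List Int) : ∀ (l : List Int) (i : Nat), signal.drop i = l →
    bNz signal.length i l = (List.range' i (l.length + 1)).map (zEnd signal) := by
  intro l
  induction l with
  | nil =>
      intro i h
      have hle : signal.length ≤ i := by
        have := congrArg List.length h; simp at this; omega
      have hz : zEnd signal i = signal.length := by rw [zEnd, dif_pos hle]
      simp [bNz, hz]
  | cons v rest ih =>
      intro i h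
      obtain ⟨hi, hv, hrest⟩ := drop_cons_facts signal i v rest h
      have ht := ih (i + 1) hrest
      have hhead : (bNz signal.length (i + 1) rest).headD signal.length = zEnd signal (i + 1) := by
        rw [ht, List.range'_succ]; rfl
      have hz : zEnd signal i = if v = 0 then i else zEnd signal (i + 1) := by
        rw [zEnd, dif_neg (by omega), hv]
      show (if v = 0 then i else (bNz signal.length (i + 1) rest).headD signal.length) ::
          bNz signal.length (i + 1) rest = _
      rw [hhead, ht, show (v :: rest).length + 1 = (rest.length + 1) + 1 from by simp, ← hz]
      conv_rhs => rw [List.range'_succ, List.map_cons]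

theorem bFgt1_eq (signal : List Int) : ∀ (l : List Int) (i : Nat), signal.drop i = l →
    bFgt1 signal.length i l = (List.range' i (l.length + 1)).map (fIdx signal) := by
  intro l
  induction l with
  | nil =>
      intro i h
      have hle : signal.length ≤ i := by
        have := congrArg List.length h; simp at this; omega
      have hz : fIdx signal i = signal.length := by rw [fIdx, dif_pos hle]
      simp [bFgt1, hz]
  | cons v rest ih =>
      intro i h
      obtain ⟨hi, hv, hrest⟩ := drop_cons_facts signal i v rest h
      have ht := ih (i + 1) hrest
      have hhead : (bFgt1 signal.length (i + 1) rest).headD signal.length = fIdx signal (i + 1) := by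
        rw [ht, List.range'_succ]; rfl
      have hz : fIdx signal i = if 1 < v then i else fIdx signal (i + 1) := by
        rw [fIdx, dif_neg (by omega), hv]
      show (if 1 < v then i else (bFgt1 signal.length (i + 1) rest).headD signal.length) ::
          bFgt1 signal.length (i + 1) rest = _
      rw [hhead, ht, show (v :: rest).length + 1 = (rest.length + 1) + 1 from by simp, ← hz]
      conv_rhs => rw [List.range'_succ, List.map_cons]

theorem bBmax_eq (signal : List Int) : ∀ (l : List Int) (i : Nat), signal.drop i = l →
    bBmax l = (List.range' i (l.length + 1)).map (bm signal) := by
  intro l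
  induction l with
  | nil =>
      intro i h
      have hle : signal.length ≤ i := by
        have := congrArg List.length h; simp at this; omega
      have hz : bm signal i = 0 := by rw [bm, dif_pos hle]
      simp [bBmax, hz]
  | cons v rest ih =>
      intro i h
      obtain ⟨hi, hv, hrest⟩ := drop_cons_facts signal i v rest h
      have ht := ih (i + 1) hrest
      have hhead : (bBmax rest).headD 0 = bm signal (i + 1) := by
        rw [ht, List.range'_succ]; rfl
      have hz : bm signal i =
          if v = 0 then 0 else (if bm signal (i + 1) < v then v else bm signal (i + 1)) := by
        rw [bm, dif_neg (by omega), hv]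
      show (if v = 0 then 0 else (if (bBmax rest).headD 0 < v then v else (bBmax rest).headD 0)) ::
          bBmax rest = _
      rw [hhead, ht, show (v :: rest).length + 1 = (rest.length + 1) + 1 from by simp, ← hz]
      conv_rhs => rw [List.range'_succ, List.map_cons]

theorem bLgt1_eq (signal : List Int) : ∀ (l : List Int) (i : Nat), signal.drop i = l →
    bLgt1 i (lg signal i) l = (List.range' (i + 1) l.length).map (lg signal) := by
  intro l
  induction l with
  | nil => intro i h; simp [bLgt1]
  | cons v rest ih =>
      intro i h
      obtain ⟨hi, hv, hrest⟩ := drop_cons_facts signal i v rest h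
      have hcur : (if 1 < v then (i : Int) else lg signal i) = lg signal (i + 1) := by
        show _ = if 1 < signal.getD i 0 then (i : Int) else lg signal i
        rw [hv]
      show (if 1 < v then (i : Int) else lg signal i) ::
          bLgt1 (i + 1) (if 1 < v then (i : Int) else lg signal i) rest = _
      rw [hcur, ih (i + 1) hrest,
        show (v :: rest).length = rest.length + 1 from rfl, List.range'_succ, List.map_cons]

-- the full lgt1 table (with its -1 sentinel head) tabulates lg on 0..n
theorem lgt1_table_eq (signal : List Int) :
    ((-1 : Int) :: bLgt1 0 (-1) signal) =
      (List.range' 0 (signal.length + 1)).map (lg signal) := by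
  have h0 : lg signal 0 = -1 := rfl
  rw [List.range'_succ, List.map_cons, ← h0]
  congr 1
  have := bLgt1_eq signal signal 0 (by simp)
  rwa [h0] at this


-- fold-max commutation
theorem foldl_max_max (signal : List Int) (l : List Nat) : ∀ (a b : Int),
    List.foldl (fun x j => max x (signal.getD j 0)) (max a b) l =
      max a (List.foldl (fun x j => max x (signal.getD j 0)) b l) := by
  induction l with
  | nil => intro a b; rfl
  | cons x xs ih =>
      intro a b
      simp only [List.foldl_cons, max_assoc, ih]

-- A's running-max fold is a max fold
theorem foldl_ifmax_eq (signal : List Int) (l : List Nat) : ∀ (a : Int),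
    List.foldl (fun m j => if m < signal.getD j 0 then signal.getD j 0 else m) a l =
      List.foldl (fun x y => max x (signal.getD y 0)) a l := by
  induction l with
  | nil => intro a; rfl
  | cons x xs ih =>
      intro a
      simp only [List.foldl_cons, ih]
      congr 1
      rw [max_def]; split_ifs <;> omega

-- the bmax table entry is the zero-padded max of the block
theorem bm_eq (signal : List Int) (i : Nat) :
    bm signal i =
      List.foldl (fun x j => max x (signal.getD j 0)) 0
        (List.range' i (zEnd signal i - i)) := by
  fun_induction bm with
  | case1 i hle =>
      have hz : zEnd signal i = signal.length := by rw [zEnd, dif_pos hle]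
      rw [hz, Nat.sub_eq_zero_of_le hle]
      rfl
  | case2 i hle hz0 =>
      have hz : zEnd signal i = i := by rw [zEnd, dif_neg hle, if_pos hz0]
      rw [hz, Nat.sub_self]
      rfl
  | case3 i hle hz0 hcond ihr =>
      have hz : zEnd signal i = zEnd signal (i + 1) := zEnd_succ signal i (by omega) hz0
      have hge : i + 1 ≤ zEnd signal (i + 1) :=
        zEnd_ge signal (i + 1) (by have := zEnd_le signal (i + 1); omega)
      have hr : List.range' i (zEnd signal i - i) =
          i :: List.range' (i + 1) (zEnd signal (i + 1) - (i + 1)) := by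
        rw [hz, show zEnd signal (i + 1) - i = (zEnd signal (i + 1) - (i + 1)) + 1 by omega,
          List.range'_succ]
      rw [hr, List.foldl_cons,
        show max (0 : Int) (signal.getD i 0) = max (signal.getD i 0) 0 from max_comm _ _,
        foldl_max_max, ← ihr, max_def]
      split_ifs <;> omega
  | case4 i hle hz0 hcond ihr =>
      have hz : zEnd signal i = zEnd signal (i + 1) := zEnd_succ signal i (by omega) hz0
      have hge : i + 1 ≤ zEnd signal (i + 1) :=
        zEnd_ge signal (i + 1) (by have := zEnd_le signal (i + 1); omega)
      have hr : List.range' i (zEnd signal i - i) =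
          i :: List.range' (i + 1) (zEnd signal (i + 1) - (i + 1)) := by
        rw [hz, show zEnd signal (i + 1) - i = (zEnd signal (i + 1) - (i + 1)) + 1 by omega,
          List.range'_succ]
      rw [hr, List.foldl_cons,
        show max (0 : Int) (signal.getD i 0) = max (signal.getD i 0) 0 from max_comm _ _,
        foldl_max_max, ← ihr, max_def]
      split_ifs <;> omega

-- a max fold is attained by its seed or by some scanned element
theorem foldl_max_attained (signal : List Int) (l : List Nat) : ∀ (a : Int),
    List.foldl (fun x j => max x (signal.getD j 0)) a l = a ∨
      ∃ j ∈ l, List.foldl (fun x j => max x (signal.getD j 0)) a l = signal.getD j 0 := by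
  induction l with
  | nil => intro a; left; rfl
  | cons x xs ih =>
      intro a
      rw [List.foldl_cons]
      rcases ih (max a (signal.getD x 0)) with h | ⟨j, hj, hv⟩
      · rw [h]
        rcases max_choice a (signal.getD x 0) with hm | hm
        · left; exact hm
        · right; exact ⟨x, List.mem_cons_self, hm⟩
      · right; exact ⟨j, List.mem_cons_of_mem _ hj, hv⟩

-- A's begin-trim loop computes fIdx (given an element > 1 exists in range and fuel covers it)
theorem trimUp_eq (signal : List Int) : ∀ (fuel b : Nat),
    (∃ j, b ≤ j ∧ j < signal.length ∧ j < b + fuel ∧ 1 < signal.getD j 0) →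
    apTrimUp signal fuel ((b : Nat) : Int) = ((fIdx signal b : Nat) : Int) := by
  intro fuel
  induction fuel with
  | zero => intro b ⟨j, h1, h2, h3, h4⟩; omega
  | succ fuel ih =>
      intro b ⟨j, h1, h2, h3, h4⟩
      have hb : b < signal.length := by omega
      have hget : (PySem.List.pyGet? signal ((b : Nat) : Int)).getD 2 = signal.getD b 0 := by
        rw [PySem.List.pyGet?_natCast, List.getElem?_eq_getElem hb, Option.getD_some,
          List.getD_eq_getElem?_getD, List.getElem?_eq_getElem hb, Option.getD_some]
      by_cases hgt : 1 < signal.getD b 0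
      · rw [apTrimUp, hget, if_neg (by omega), fIdx, dif_neg (by omega), if_pos hgt]
      · have hjb : j ≠ b := fun he => hgt (he ▸ h4)
        rw [apTrimUp, hget, if_pos (by omega), fIdx, dif_neg (by omega), if_neg hgt]
        have hc : ((b : Nat) : Int) + 1 = (((b + 1 : Nat)) : Int) := by push_cast; ring
        rw [hc, ih (b + 1) ⟨j, by omega, h2, by omega, h4⟩]

-- A's end-trim loop computes lg (given an element > 1 exists below and fuel covers it)
theorem trimDown_eq (signal : List Int) : ∀ (fuel e : Nat), e < signal.length →
    (∃ j, j ≤ e ∧ e < j + fuel ∧ 1 < signal.getD j 0) →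
    apTrimDown signal fuel ((e : Nat) : Int) = lg signal (e + 1) := by
  intro fuel
  induction fuel with
  | zero => intro e he ⟨j, h1, h2, h3⟩; omega
  | succ fuel ih =>
      intro e he ⟨j, h1, h2, h3⟩
      have hget : (PySem.List.pyGet? signal ((e : Nat) : Int)).getD 2 = signal.getD e 0 := by
        rw [PySem.List.pyGet?_natCast, List.getElem?_eq_getElem he, Option.getD_some,
          List.getD_eq_getElem?_getD, List.getElem?_eq_getElem he, Option.getD_some]
      by_cases hgt : 1 < signal.getD e 0
      · rw [apTrimDown, hget, if_neg (by omega)]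
        show _ = if 1 < signal.getD e 0 then (e : Int) else lg signal e
        rw [if_pos hgt]
      · have hje : j ≠ e := fun hh => hgt (hh ▸ h3)
        have he1 : 1 ≤ e := by omega
        rw [apTrimDown, hget, if_pos (by omega)]
        have hc : ((e : Nat) : Int) - 1 = (((e - 1 : Nat)) : Int) := by omega
        have hrec := ih (e - 1) (by omega) ⟨j, by omega, by omega, h3⟩
        rw [hc, hrec, show e - 1 + 1 = e by omega]
        show lg signal e = if 1 < signal.getD e 0 then (e : Int) else lg signal e
        rw [if_neg hgt]

-- every run recorded by A starts at an in-range positive element, with A's inner-loop result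
theorem runsA_mem (signal : List Int) : ∀ (i0 : Nat) (p : Nat × Nat × Int), p ∈ runsA signal i0 →
    p.1 < signal.length ∧ 0 < signal.getD p.1 0 ∧
      p.2 = apInner signal signal.length signal.length p.1 (signal.getD p.1 0) := by
  intro i0
  fun_induction runsA with
  | case1 i hle => intro p hp; simp at hp
  | case2 i hle hv ih =>
      intro p hp
      rcases List.mem_cons.mp hp with h | h
      · subst h; exact ⟨by omega, hv, rfl⟩
      · exact ih p h
  | case3 i hle hv ih => exact ih

-- Source B's run-start pass collects exactly the begins of A's runs
-- (clean state: no positive since the last zero; dirty state: inside a run)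
theorem starts_aux (signal : List Int) (n' : Nat) : ∀ (i : Nat) (lpos lzero : Int),
    signal.length - i ≤ n' → lpos < (i : Int) → lzero < (i : Int) →
    ((lpos ≤ lzero →
        bStarts i lpos lzero (signal.drop i) = (runsA signal i).map Prod.fst)
     ∧ (lzero < lpos →
        bStarts i lpos lzero (signal.drop i) = (runsA signal (zEnd signal i)).map Prod.fst)) := by
  induction n' with
  | zero =>
      intro i lpos lzero hn hp hz
      have hle : signal.length ≤ i := by omega
      have hd : signal.drop i = [] := List.drop_eq_nil_of_le hle
      have hr : runsA signal i = [] := by rw [runsA, dif_pos hle]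
      have hze : zEnd signal i = signal.length := by rw [zEnd, dif_pos hle]
      have hr2 : runsA signal signal.length = [] := by
        rw [runsA, dif_pos (le_refl _)]
      constructor <;> intro _ <;> simp [hd, bStarts, hr, hr2, hze]
  | succ n' ih =>
      intro i lpos lzero hn hp hz
      by_cases hle : signal.length ≤ i
      · have hd : signal.drop i = [] := List.drop_eq_nil_of_le hle
        have hr : runsA signal i = [] := by rw [runsA, dif_pos hle]
        have hze : zEnd signal i = signal.length := by rw [zEnd, dif_pos hle]
        have hr2 : runsA signal signal.length = [] := by
          rw [runsA, dif_pos (le_refl _)]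
        constructor <;> intro _ <;> simp [hd, bStarts, hr, hr2, hze]
      · have hi : i < signal.length := Nat.lt_of_not_le hle
        have hd : signal.drop i = signal[i] :: signal.drop (i + 1) :=
          List.drop_eq_getElem_cons hi
        have hvD : signal.getD i 0 = signal[i] := by
          rw [List.getD_eq_getElem?_getD, List.getElem?_eq_getElem hi, Option.getD_some]
        have hb : ∀ lp lz : Int, bStarts i lp lz (signal.drop i) =
            (if 0 < signal[i] ∧ lp ≤ lz then [i] else []) ++
              bStarts (i + 1) (if 0 < signal[i] then (i : Int) else lp)
                (if 0 < signal[i] then lz else if signal[i] = 0 then (i : Int) else lz)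
                (signal.drop (i + 1)) := by
          intro lp lz; rw [hd]; rfl
        rcases lt_trichotomy (0 : Int) signal[i] with hv | hv | hv
        · -- positive element: a run/segment starts here iff the state is clean
          have hvpos : 0 < signal.getD i 0 := by rw [hvD]; exact hv
          have hfst : (apInner signal signal.length signal.length i (signal.getD i 0)).1 =
              zEnd signal (i + 1) := by rw [apInner_eq signal i _ hi]
          have hrun : (runsA signal i).map Prod.fst =
              i :: (runsA signal (zEnd signal (i + 1))).map Prod.fst := by
            rw [runsA, dif_neg hle, if_pos hvpos]
            show ((i, apInner signal signal.length signal.length i (signal.getD i 0)) ::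
                runsA signal
                  (apInner signal signal.length signal.length i (signal.getD i 0)).1).map
                Prod.fst = _
            rw [hfst, List.map_cons]
          have hze : zEnd signal i = zEnd signal (i + 1) :=
            zEnd_succ signal i hi (by omega)
          constructor
          · intro hcl
            rw [hb, if_pos ⟨hv, hcl⟩, if_pos hv, if_pos hv]
            have hdirty := (ih (i + 1) (i : Int) lzero (by omega) (by push_cast; omega)
              (by push_cast; omega)).2 hz
            rw [hdirty, hrun]
            rfl
          · intro hdy
            rw [hb, if_neg (fun hc => absurd hc.2 (not_le.mpr hdy)), if_pos hv, if_pos hv]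
            have hdirty := (ih (i + 1) (i : Int) lzero (by omega) (by push_cast; omega)
              (by push_cast; omega)).2 hz
            rw [hdirty, hze]
            rfl
        · -- zero element: state becomes clean, A skips
          have hv0 : signal.getD i 0 = 0 := by rw [hvD, ← hv]
          have hnp : ¬ 0 < signal[i] := by omega
          have hrun : runsA signal i = runsA signal (i + 1) := by
            rw [runsA, dif_neg hle, if_neg (by omega)]
          have hze : zEnd signal i = i := by rw [zEnd, dif_neg hle, if_pos hv0]
          constructor
          · intro hcl
            rw [hb, if_neg (fun hc => hnp hc.1), if_neg hnp, if_neg hnp, if_pos hv.symm]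
            have hclean := (ih (i + 1) lpos (i : Int) (by omega) (by push_cast; omega)
              (by push_cast; omega)).1 (by omega)
            rw [hclean, hrun]
            rfl
          · intro hdy
            rw [hb, if_neg (fun hc => hnp hc.1), if_neg hnp, if_neg hnp, if_pos hv.symm]
            have hclean := (ih (i + 1) lpos (i : Int) (by omega) (by push_cast; omega)
              (by push_cast; omega)).1 (by omega)
            rw [hclean, hze, hrun]
            rfl
        · -- negative element: state unchanged, A skips
          have hvneg : signal.getD i 0 < 0 := by rw [hvD]; exact hv
          have hnp : ¬ 0 < signal[i] := by omega
          have hnz : ¬ signal[i] = 0 := by omega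
          have hrun : runsA signal i = runsA signal (i + 1) := by
            rw [runsA, dif_neg hle, if_neg (by omega)]
          have hze : zEnd signal i = zEnd signal (i + 1) :=
            zEnd_succ signal i hi (by omega)
          constructor
          · intro hcl
            rw [hb, if_neg (fun hc => hnp hc.1), if_neg hnp, if_neg hnp, if_neg hnz]
            have hclean := (ih (i + 1) lpos lzero (by omega) (by push_cast; omega)
              (by push_cast; omega)).1 hcl
            rw [hclean, hrun, List.nil_append]
          · intro hdy
            rw [hb, if_neg (fun hc => hnp hc.1), if_neg hnp, if_neg hnp, if_neg hnz]
            have hdirty := (ih (i + 1) lpos lzero (by omega) (by push_cast; omega)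
              (by push_cast; omega)).2 hdy
            rw [hdirty, hze, List.nil_append]

theorem bStarts_eq (signal : List Int) :
    bStarts 0 (-1) (-1) signal = (runsA signal 0).map Prod.fst := by
  have h := (starts_aux signal signal.length 0 (-1) (-1) (by omega) (by norm_num)
    (by norm_num)).1 (le_refl _)
  simpa using h

-- table lookups at an in-range index
theorem nz_getD (signal : List Int) (k : Nat) (h : k ≤ signal.length) :
    (bNz signal.length 0 signal).getD k signal.length = zEnd signal k := by
  rw [bNz_eq signal signal 0 rfl,
    getD_map_range' (zEnd signal) 0 (signal.length + 1) k signal.length (by omega),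
    Nat.zero_add]

theorem fgt1_getD (signal : List Int) (k : Nat) (h : k ≤ signal.length) :
    (bFgt1 signal.length 0 signal).getD k signal.length = fIdx signal k := by
  rw [bFgt1_eq signal signal 0 rfl,
    getD_map_range' (fIdx signal) 0 (signal.length + 1) k signal.length (by omega),
    Nat.zero_add]

theorem bmax_getD (signal : List Int) (k : Nat) (h : k ≤ signal.length) :
    (bBmax signal).getD k 0 = bm signal k := by
  rw [bBmax_eq signal signal 0 rfl,
    getD_map_range' (bm signal) 0 (signal.length + 1) k 0 (by omega), Nat.zero_add]

theorem lgt1_getD (signal : List Int) (k : Nat) (h : k ≤ signal.length) :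
    ((-1 : Int) :: bLgt1 0 (-1) signal).getD k (-1) = lg signal k := by
  rw [lgt1_table_eq signal,
    getD_map_range' (lg signal) 0 (signal.length + 1) k (-1) (by omega), Nat.zero_add]

-- per-run agreement of A's filter step with B's table-lookup step
theorem step_eq (signal : List Int) (i : Nat) (hi : i < signal.length)
    (hpos : 0 < signal.getD i 0) (acc : List (List Int)) :
    apStep signal acc
        (mkPeak signal.length (i, apInner signal signal.length signal.length i (signal.getD i 0))) =
      bStep signal.length (bNz signal.length 0 signal) (bFgt1 signal.length 0 signal)
        (bBmax signal) ((-1 : Int) :: bLgt1 0 (-1) signal) acc i := by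
  have hz : zEnd signal i = zEnd signal (i + 1) := zEnd_succ signal i hi (by omega)
  have hE1 : i + 1 ≤ zEnd signal (i + 1) := zEnd_ge signal (i + 1) (by omega)
  have hE2 : zEnd signal (i + 1) ≤ signal.length := zEnd_le signal (i + 1)
  rw [apInner_eq signal i _ hi]
  set E := zEnd signal (i + 1) with hEdef
  set val := List.foldl (fun m j => if m < signal.getD j 0 then signal.getD j 0 else m)
      (signal.getD i 0) (List.range' (i + 1) (E - (i + 1))) with hvdef
  have hbm : bm signal i = val := by
    rw [bm_eq, hz, show E - i = (E - (i + 1)) + 1 by omega, List.range'_succ,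
      List.foldl_cons,
      show max (0 : Int) (signal.getD i 0) = signal.getD i 0 from by
        rw [max_def]; split_ifs <;> omega,
      hvdef, foldl_ifmax_eq]
  have hbmT : (bBmax signal).getD i 0 = val := by rw [bmax_getD signal i (by omega), hbm]
  have hnzT : (bNz signal.length 0 signal).getD i signal.length = E := by
    rw [nz_getD signal i (by omega), hz]
  have hfgT : (bFgt1 signal.length 0 signal).getD i signal.length = fIdx signal i :=
    fgt1_getD signal i (by omega)
  simp only [apStep, bStep, mkPeak, hbmT, hnzT, hfgT]
  by_cases h3 : val ≤ 3
  · rw [if_pos h3, if_neg (fun hc => absurd h3 (not_le.mpr hc.1))]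
  · have hval_mem : ∃ j₀, i ≤ j₀ ∧ j₀ < E ∧ signal.getD j₀ 0 = val := by
      have := foldl_max_attained signal (List.range' (i + 1) (E - (i + 1))) (signal.getD i 0)
      rw [← foldl_ifmax_eq, ← hvdef] at this
      rcases this with h | ⟨j, hj, hv⟩
      · exact ⟨i, le_refl i, by omega, h.symm⟩
      · rw [List.mem_range'_1] at hj
        exact ⟨j, by omega, by omega, hv.symm⟩
    obtain ⟨j₀, hj0a, hj0b, hj0v⟩ := hval_mem
    have hj0len : j₀ < signal.length := by omega
    have hj0gt : 1 < signal.getD j₀ 0 := by omega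
    by_cases h11 : val ≤ 11
    · set eNat : Nat := if E < signal.length then E else signal.length - 1 with heN
      have heNlt : eNat < signal.length := by
        rw [heN]; split_ifs <;> omega
      have hj0e : j₀ ≤ eNat := by
        rw [heN]; split_ifs <;> omega
      have he : (if E = signal.length then ((signal.length : Nat) : Int) - 1
          else ((E : Nat) : Int)) = ((eNat : Nat) : Int) := by
        rw [heN]
        by_cases hEl : E = signal.length
        · rw [if_pos hEl, if_neg (by omega)]; omega
        · rw [if_neg hEl, if_pos (by omega)]
      have htu : apTrimUp signal (signal.length + 1) ((i : Nat) : Int) =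
          ((fIdx signal i : Nat) : Int) :=
        trimUp_eq signal (signal.length + 1) i ⟨j₀, hj0a, hj0len, by omega, hj0gt⟩
      have htd : apTrimDown signal (signal.length + 1) ((eNat : Nat) : Int) =
          lg signal (eNat + 1) :=
        trimDown_eq signal (signal.length + 1) eNat heNlt ⟨j₀, hj0e, by omega, hj0gt⟩
      have hlgT : ((-1 : Int) :: bLgt1 0 (-1) signal).getD (eNat + 1) (-1) =
          lg signal (eNat + 1) := lgt1_getD signal (eNat + 1) (by omega)
      rw [he, htu, htd, hlgT]
      by_cases hw : lg signal (eNat + 1) - ((fIdx signal i : Nat) : Int) ≤ 5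
      · rw [if_neg h3, if_pos ⟨h11, hw⟩,
          if_pos (⟨by omega, h11⟩ : 3 < val ∧ val ≤ 11), if_pos hw]
      · rw [if_neg h3, if_neg (fun hc : val ≤ 11 ∧ _ => hw hc.2),
          if_pos (⟨by omega, h11⟩ : 3 < val ∧ val ≤ 11), if_neg hw]
    · rw [if_neg h3, if_neg (fun hc : val ≤ 11 ∧ _ => h11 hc.1),
        if_neg (fun hc : 3 < val ∧ val ≤ 11 => h11 hc.2)]

-- foldl over A's runs (through mkPeak) equals foldl over their begins (through the tables)
theorem fold_congr (signal : List Int) : ∀ (l : List (Nat × Nat × Int)) (acc : List (List Int)),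
    (∀ p ∈ l, p.1 < signal.length ∧ 0 < signal.getD p.1 0 ∧
      p.2 = apInner signal signal.length signal.length p.1 (signal.getD p.1 0)) →
    (l.map (mkPeak signal.length)).foldl (apStep signal) acc =
      (l.map Prod.fst).foldl
        (bStep signal.length (bNz signal.length 0 signal) (bFgt1 signal.length 0 signal)
          (bBmax signal) ((-1 : Int) :: bLgt1 0 (-1) signal)) acc := by
  intro l
  induction l with
  | nil => intro acc _; rfl
  | cons p tl ih =>
      intro acc hmem
      obtain ⟨h1, h2, h3⟩ := hmem p List.mem_cons_self
      simp only [List.map_cons, List.foldl_cons]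
      rw [show mkPeak signal.length p =
          mkPeak signal.length
            (p.1, apInner signal signal.length signal.length p.1 (signal.getD p.1 0)) from by
        rw [← h3]]
      rw [step_eq signal p.1 h1 h2 acc]
      exact ih _ (fun q hq => hmem q (List.mem_cons_of_mem _ hq))

-- ===== VERDICT (by name: the statement is the Claim_ definition above) =====
theorem delete_peak_spec : Claim_equal_delete_peak := by
  intro signal _
  unfold Spec_delete_peak delete_peak delete_peak_alt
  rw [apOuter_eq signal (signal.length + 1) 0 [] (by omega), bStarts_eq, List.nil_append]
  exact fold_congr signal (runsA signal 0) [] (runsA_mem signal 0)
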